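-- pv_equiv track=rewrite | github.com/Algo-log-KZ/Algo_log | 05_힙/Programmers_더 맵게_신정인.py | solution
-- ===== SOURCE A (Python) =====
-- import heapq
--
-- def solution(scoville, K):
--     answer = 0
--     heapq.heapify(scoville)
--     while scoville[0]<K:
--         if len(scoville)<2:
--             return -1
--         num1=heapq.heappop(scoville)
--         num2=heapq.heappop(scoville)
--         num3=num1+(num2*2)
--         heapq.heappush(scoville,num3)
--         answer+=1
--     return answer
-- ===== SOURCE B (Python) =====
-- def solution(scoville, K):
--     # Plain-list re-implementation: repeatedly scan for the two smallest
--     # values instead of maintaining a heap. Return-value equivalent to A;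
--     # A mutates its argument in place (heapify), B leaves it untouched.
--     s = list(scoville)
--     answer = 0
--     while True:
--         a = min(s)              # raises ValueError on empty input (A raises IndexError there)
--         if a >= K:
--             return answer
--         if len(s) < 2:
--             return -1
--         s.remove(a)
--         b = min(s)
--         s.remove(b)
--         s.append(a + 2 * b)
--         answer += 1
-- ===== Notes on version B (the rewrite author's own statement) =====
-- stated objective: simpler
-- what changed: Replaces the binary heap (heapq heapify/heappop/heappush) by a plain list scanned for its minimum each round: take the two smallest by min()+remove(), append a+2*b, count rounds; B copies the list instead of mutating the argument in place.
import Mathlib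
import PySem

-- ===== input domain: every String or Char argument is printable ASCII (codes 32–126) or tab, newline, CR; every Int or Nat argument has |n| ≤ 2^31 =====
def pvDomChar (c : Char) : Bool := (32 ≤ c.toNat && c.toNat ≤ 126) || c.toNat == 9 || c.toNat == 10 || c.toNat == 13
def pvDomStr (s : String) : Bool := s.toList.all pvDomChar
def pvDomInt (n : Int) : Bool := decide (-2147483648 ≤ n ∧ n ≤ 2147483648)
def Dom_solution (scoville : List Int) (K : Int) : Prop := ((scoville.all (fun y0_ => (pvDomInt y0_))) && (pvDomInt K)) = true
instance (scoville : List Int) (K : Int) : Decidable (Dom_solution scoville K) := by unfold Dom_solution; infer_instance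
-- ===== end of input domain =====

-- B replaces A's binary heap by a plain list scanned for its minimum each round
-- (min + remove twice, append a+2*b); equivalence is about the RETURN VALUE only:
-- A's heapify mutates its list argument in place, B leaves the argument untouched.

-- ===== PORT A =====
-- heap[i] with default (indices used by heapq are always in range)
def hget (l : List Int) (i : Nat) : Int := l.getD i 0

-- heapq._siftdown(heap, startpos, pos) with newitem = heap[pos] read at entry;
-- parentpos = (pos-1)//2, parent = heap[parentpos]
def siftdownLoop (heap : List Int) (startpos pos : Nat) (newitem : Int) : List Int :=
  if _h : startpos < pos then
    if newitem < hget heap ((pos - 1) / 2) then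
      siftdownLoop (heap.set pos (hget heap ((pos - 1) / 2))) startpos ((pos - 1) / 2) newitem
    else heap.set pos newitem
  else heap.set pos newitem
termination_by pos
decreasing_by omega

-- childpos selection of heapq._siftup: right child if not heap[childpos] < heap[rightpos]
def sChild (heap : List Int) (pos : Nat) : Nat :=
  if 2*pos+2 < heap.length ∧ ¬ (hget heap (2*pos+1) < hget heap (2*pos+2)) then 2*pos+2 else 2*pos+1

lemma sChild_bounds (heap : List Int) (pos : Nat) (h : 2*pos+1 < heap.length) :
    pos < sChild heap pos ∧ sChild heap pos < heap.length := by
  unfold sChild; split <;> omega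

-- heapq._siftup's while loop; at loop exit: heap[pos] = newitem; _siftdown(heap, startpos, pos)
def siftupLoop (heap : List Int) (startpos pos : Nat) (newitem : Int) : List Int :=
  if _h : 2*pos+1 < heap.length then
    siftupLoop (heap.set pos (hget heap (sChild heap pos))) startpos (sChild heap pos) newitem
  else
    siftdownLoop (heap.set pos newitem) startpos pos newitem
termination_by heap.length - pos
decreasing_by
  simp only [List.length_set]
  have := sChild_bounds heap pos _h
  omega

-- heapq._siftup(heap, pos)
def pySiftup (heap : List Int) (pos : Nat) : List Int := siftupLoop heap pos pos (hget heap pos)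

-- heapq.heapify: for i in reversed(range(n//2)): _siftup(x, i)
def heapifyAux (heap : List Int) : Nat → List Int
  | 0 => heap
  | i+1 => heapifyAux (pySiftup heap i) i

def pyHeapify (heap : List Int) : List Int := heapifyAux heap (heap.length / 2)

-- heapq.heappop (on a nonempty heap; the empty case raises and is outside Pre_)
def pyHeappop (heap : List Int) : Int × List Int :=
  if (heap.dropLast).isEmpty then (hget heap (heap.length - 1), heap.dropLast)
  else (hget (heap.dropLast) 0,
        pySiftup ((heap.dropLast).set 0 (hget heap (heap.length - 1))) 0)

-- heapq.heappush: heap.append(item); _siftdown(heap, 0, len(heap)-1)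
def pyHeappush (heap : List Int) (item : Int) : List Int :=
  siftdownLoop (heap ++ [item]) 0 ((heap ++ [item]).length - 1)
    (hget (heap ++ [item]) ((heap ++ [item]).length - 1))

-- length lemmas (cited by loopA's termination proof)
lemma length_siftdownLoop : ∀ (pos : Nat) (heap : List Int) (s : Nat) (x : Int),
    (siftdownLoop heap s pos x).length = heap.length := by
  intro pos
  induction pos using Nat.strong_induction_on with
  | _ pos ih =>
    intro heap s x
    rw [siftdownLoop]
    split
    · split
      · rw [ih _ (by omega)]; simp
      · simp
    · simp

lemma length_siftupLoop : ∀ (n : Nat) (heap : List Int) (s pos : Nat) (x : Int),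
    heap.length - pos = n → (siftupLoop heap s pos x).length = heap.length := by
  intro n
  induction n using Nat.strong_induction_on with
  | _ n ih =>
    intro heap s pos x hn
    rw [siftupLoop]
    split
    · rename_i h
      have hb := sChild_bounds heap pos h
      rw [ih (heap.length - sChild heap pos) (by omega) _ _ _ _ (by simp)]
      simp
    · rw [length_siftdownLoop]; simp

lemma length_pySiftup (heap : List Int) (pos : Nat) :
    (pySiftup heap pos).length = heap.length := by
  unfold pySiftup; exact length_siftupLoop _ _ _ _ _ rfl

lemma length_pyHeappop (heap : List Int) :
    (pyHeappop heap).2.length = heap.length - 1 := by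
  unfold pyHeappop
  split
  · simp
  · simp [length_pySiftup]

lemma length_pyHeappush (heap : List Int) (x : Int) :
    (pyHeappush heap x).length = heap.length + 1 := by
  unfold pyHeappush; rw [length_siftdownLoop]; simp

-- A's while loop: while scoville[0] < K: …
def loopA (heap : List Int) (K : Int) (answer : Int) : Int :=
  if hget heap 0 < K then
    if heap.length < 2 then -1
    else
      loopA (pyHeappush (pyHeappop (pyHeappop heap).2).2
               ((pyHeappop heap).1 + (pyHeappop (pyHeappop heap).2).1 * 2)) K (answer + 1)
  else answer
termination_by heap.length
decreasing_by simp only [length_pyHeappush, length_pyHeappop]; omega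

def solution (scoville : List Int) (K : Int) : Int := loopA (pyHeapify scoville) K 0

-- ===== PORT B =====
-- B's while loop: a = min(s); return answer if a >= K; return -1 if len(s) < 2;
-- s.remove(a); b = min(s); s.remove(b); s.append(a + 2*b); answer += 1
def loopB (s : List Int) (K : Int) (answer : Int) : Int :=
  match _ha : PySem.List.min? s (fun x => x) with
  | none => answer   -- Python's min([]) raises ValueError here; outside Pre_solution
  | some a =>
    if K ≤ a then answer
    else if (s.length : Int) < 2 then -1
    else
      match _hb : PySem.List.min? ((PySem.List.remove? s a).getD []) (fun x => x) with
      | none => answer  -- unreachable: the remaining list is nonempty when len(s) ≥ 2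
      | some b =>
        loopB ((PySem.List.remove? ((PySem.List.remove? s a).getD []) b).getD []
                 ++ [a + 2*b]) K (answer + 1)
termination_by s.length
decreasing_by
  have ha' := PySem.List.min?_mem _ha
  have h1 : PySem.List.remove? s a = some (s.erase a) :=
    PySem.List.remove?_eq_some_erase s a ha'
  have hb' := PySem.List.min?_mem _hb
  rw [h1] at hb' ⊢
  simp only [Option.getD_some] at hb' ⊢
  have h2 : PySem.List.remove? (s.erase a) b = some ((s.erase a).erase b) :=
    PySem.List.remove?_eq_some_erase _ b hb'
  rw [h2]
  have hl1 : (s.erase a).length = s.length - 1 := List.length_erase_of_mem ha'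
  have hl2 : ((s.erase a).erase b).length = (s.erase a).length - 1 := List.length_erase_of_mem hb'
  have hne : s ≠ [] := by intro h0; subst h0; simp at ha'
  have : 1 ≤ s.length := List.length_pos_iff.mpr hne
  simp only [Option.getD_some, List.length_append, List.length_cons, List.length_nil]
  omega

def solution_alt (scoville : List Int) (K : Int) : Int := loopB scoville K 0

-- ===== PRECONDITION & SPEC =====
-- Pre_ excludes exactly the empty list, on which A raises IndexError (scoville[0])
-- and B raises ValueError (min of an empty list).
def Pre_solution (scoville : List Int) (K : Int) : Prop := scoville ≠ []
instance (scoville : List Int) (K : Int) : Decidable (Pre_solution scoville K) := by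
  unfold Pre_solution; infer_instance

def pvWitness_solution : List Int × Int := ([1, 2, 3, 9, 10, 12], 7)

def Spec_solution (scoville : List Int) (K : Int) (out : Int) : Prop := out = solution_alt scoville K
instance (scoville : List Int) (K : Int) (out : Int) : Decidable (Spec_solution scoville K out) := by
  unfold Spec_solution; infer_instance

-- ===== CLAIM (what is proved, stated in full; the proofs are below) =====
def Claim_equal_solution : Prop := ∀ (scoville : List Int) (K : Int), Dom_solution scoville K → Pre_solution scoville K → Spec_solution scoville K (solution scoville K)

-- ===== LEMMAS AND PROOFS =====

-- parent/child edges of the implicit binary tree; heap property from index s up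
def HeapEdge (i j : Nat) : Prop := j = 2*i+1 ∨ j = 2*i+2

def HeapFrom (l : List Int) (s : Nat) : Prop :=
  ∀ i j, s ≤ i → HeapEdge i j → j < l.length → hget l i ≤ hget l j

-- membership in the subtree rooted at s
def inSub (s : Nat) (p : Nat) : Bool :=
  if p ≤ s then p == s else inSub s ((p-1)/2)
termination_by p
decreasing_by omega

lemma inSub_self (s : Nat) : inSub s s = true := by
  rw [inSub]; simp

lemma inSub_ge : ∀ (p s : Nat), inSub s p = true → s ≤ p := by
  intro p
  induction p using Nat.strong_induction_on with
  | _ p ih =>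
    intro s h
    rw [inSub] at h
    split at h
    · simp at h; omega
    · have := ih ((p-1)/2) (by omega) s h; omega

lemma inSub_parent {s p : Nat} (hsp : s < p) (h : inSub s p = true) :
    inSub s ((p-1)/2) = true := by
  rw [inSub] at h; simpa [Nat.not_le.mpr hsp] using h

lemma inSub_child {s p c : Nat} (hc : HeapEdge p c) (h : inSub s p = true) :
    inSub s c = true := by
  have hsp := inSub_ge p s h
  have hcp : (c - 1) / 2 = p := by rcases hc with h1 | h1 <;> omega
  rw [inSub]
  have hns : ¬ c ≤ s := by rcases hc with h1 | h1 <;> omega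
  simp [hns, hcp, h]

lemma inSub_zero : ∀ p, inSub 0 p = true := by
  intro p
  induction p using Nat.strong_induction_on with
  | _ p ih =>
    rw [inSub]
    split
    · simp; omega
    · exact ih _ (by omega)

-- hget / set basics
lemma hget_set_self {l : List Int} {i : Nat} (h : i < l.length) (v : Int) :
    hget (l.set i v) i = v := by
  simp [hget, List.getD, List.getElem?_set_self h]

lemma hget_set_ne {l : List Int} {i j : Nat} (h : j ≠ i) (v : Int) :
    hget (l.set i v) j = hget l j := by
  simp [hget, List.getD, List.getElem?_set_ne h.symm]

lemma set_hget_self {l : List Int} {i : Nat} (h : i < l.length) :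
    l.set i (hget l i) = l := by
  have : hget l i = l[i] := List.getD_eq_getElem _ _ h
  rw [this, List.set_getElem_self]

-- x :: t.set j a  ~  a :: t.set j x
lemma perm_cons_set : ∀ (t : List Int) (j : Nat) (a x : Int), j < t.length →
    (x :: t.set j a).Perm (a :: t.set j x) := by
  intro t
  induction t with
  | nil => intro j a x h; simp at h
  | cons b u ih =>
    intro j a x h
    cases j with
    | zero => simpa using List.Perm.swap a x u
    | succ j =>
      simp only [List.set_cons_succ]
      exact ((List.Perm.swap b x _).trans
        (List.Perm.cons b (ih j a x (by simpa using h)))).trans (List.Perm.swap a b _)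

-- shift the value at i down into hole j (i < j), write x at i
lemma perm_set_down : ∀ (l : List Int) (i j : Nat) (x : Int), i < j → j < l.length →
    ((l.set j (hget l i)).set i x).Perm (l.set j x) := by
  intro l
  induction l with
  | nil => intro i j x h1 h2; simp at h2
  | cons a t ih =>
    intro i j x h1 h2
    cases i with
    | zero =>
      cases j with
      | zero => omega
      | succ j =>
        simp only [List.set_cons_succ, List.set_cons_zero, hget, List.getD_cons_zero]
        exact perm_cons_set t j a x (by simpa using h2)
    | succ i =>
      cases j with
      | zero => omega
      | succ j =>
        simp only [List.set_cons_succ, hget, List.getD_cons_succ]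
        exact List.Perm.cons a (ih i j x (by omega) (by simpa using h2))

-- shift the value at j up into hole i (i < j), write x at j
lemma perm_set_up : ∀ (l : List Int) (i j : Nat) (x : Int), i < j → j < l.length →
    ((l.set i (hget l j)).set j x).Perm (l.set i x) := by
  intro l
  induction l with
  | nil => intro i j x h1 h2; simp at h2
  | cons a t ih =>
    intro i j x h1 h2
    cases i with
    | zero =>
      cases j with
      | zero => omega
      | succ j =>
        simp only [List.set_cons_succ, List.set_cons_zero, hget, List.getD_cons_succ]
        have hjt : j < t.length := by simpa using h2
        have hset : t.set j (hget t j) = t := set_hget_self hjt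
        have hp := (perm_cons_set t j x (hget t j) hjt).symm
        rw [hset] at hp
        exact hp.symm
    | succ i =>
      cases j with
      | zero => omega
      | succ j =>
        simp only [List.set_cons_succ, hget, List.getD_cons_succ]
        exact List.Perm.cons a (ih i j x (by omega) (by simpa using h2))

-- root of a heap is a minimum
lemma heapFrom_root_min {l : List Int} (hh : HeapFrom l 0) :
    ∀ j, j < l.length → hget l 0 ≤ hget l j := by
  intro j
  induction j using Nat.strong_induction_on with
  | _ j ih =>
    intro hj
    cases j with
    | zero => exact le_refl _
    | succ j' =>
      have hpar : HeapEdge ((j'+1-1)/2) (j'+1) := by unfold HeapEdge; omega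
      have h1 : hget l ((j'+1-1)/2) ≤ hget l (j'+1) := hh _ _ (by omega) hpar hj
      have h2 : hget l 0 ≤ hget l ((j'+1-1)/2) := ih _ (by omega) (by omega)
      exact le_trans h2 h1

lemma heapFrom_root_min_mem {l : List Int} (hh : HeapFrom l 0) :
    ∀ y ∈ l, hget l 0 ≤ y := by
  intro y hy
  obtain ⟨j, hj, rfl⟩ := List.mem_iff_getElem.mp hy
  have := heapFrom_root_min hh j hj
  simp only [hget] at this
  rwa [List.getD_eq_getElem _ _ hj] at this

lemma hget_mem {l : List Int} {i : Nat} (h : i < l.length) : hget l i ∈ l := by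
  rw [hget, List.getD_eq_getElem _ _ h]; exact List.getElem_mem h

-- chosen child is a child, and is minimal among the (one or two) children
lemma sChild_edge (l : List Int) (pos : Nat) : HeapEdge pos (sChild l pos) := by
  unfold sChild HeapEdge; split
  · right; rfl
  · left; rfl

lemma sChild_min (l : List Int) (pos : Nat) (h : 2*pos+1 < l.length) :
    ∀ d, HeapEdge pos d → d < l.length → hget l (sChild l pos) ≤ hget l d := by
  intro d hd hdl
  unfold sChild
  rcases hd with h1 | h1 <;> subst h1 <;> split <;> rename_i hcond
  · omega
  · exact le_refl _
  · exact le_refl _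
  · have : hget l (2*pos+1) < hget l (2*pos+2) := by
      by_contra hno
      exact hcond ⟨hdl, hno⟩
    omega

-- ===== correctness of the heapq primitives =====

lemma siftdownLoop_spec : ∀ (pos : Nat) (l : List Int) (s : Nat) (newitem : Int),
    pos < l.length → inSub s pos = true →
    (∀ i j, s ≤ i → HeapEdge i j → j < l.length → j ≠ pos →
      hget (l.set pos newitem) i ≤ hget (l.set pos newitem) j) →
    (s < pos → ∀ j, HeapEdge pos j → j < l.length →
      hget (l.set pos newitem) ((pos-1)/2) ≤ hget (l.set pos newitem) j) →
    HeapFrom (siftdownLoop l s pos newitem) s ∧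
      (siftdownLoop l s pos newitem).Perm (l.set pos newitem) := by
  intro pos
  induction pos using Nat.strong_induction_on with
  | _ pos ihs =>
    intro l s newitem hp hs ha hb
    have huniq : ∀ i, HeapEdge i pos → i = (pos-1)/2 := by
      intro i hi; rcases hi with h1 | h1 <;> omega
    rw [siftdownLoop]
    split
    · rename_i hsp
      have hPpos : (pos-1)/2 < pos := by omega
      have hsP : s ≤ (pos-1)/2 := inSub_ge _ _ (inSub_parent hsp hs)
      split
      · rename_i hlt
        -- recursive case: parent moves down into pos, continue at parentpos
        have hb2 := ihs ((pos-1)/2) hPpos (l.set pos (hget l ((pos-1)/2))) s newitem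
          (by simp; omega) (inSub_parent hsp hs) ?_ ?_
        · refine ⟨hb2.1, hb2.2.trans ?_⟩
          exact perm_set_down l ((pos-1)/2) pos newitem hPpos hp
        · -- heap-except-pos invariant for the shifted array
          intro i j hi hedge hj hjP
          simp only [List.length_set] at hj
          have hvP : hget ((l.set pos (hget l ((pos-1)/2))).set ((pos-1)/2) newitem) ((pos-1)/2) = newitem :=
            hget_set_self (by simp; omega) _
          have hvpos : hget ((l.set pos (hget l ((pos-1)/2))).set ((pos-1)/2) newitem) pos = hget l ((pos-1)/2) := by
            rw [hget_set_ne (by omega), hget_set_self hp]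
          have hvo : ∀ k, k ≠ (pos-1)/2 → k ≠ pos →
              hget ((l.set pos (hget l ((pos-1)/2))).set ((pos-1)/2) newitem) k = hget l k := by
            intro k h1 h2; rw [hget_set_ne h1, hget_set_ne h2]
          have hvsame : ∀ k, k ≠ pos → hget (l.set pos newitem) k = hget l k := by
            intro k hk; rw [hget_set_ne hk]
          by_cases hjpos : j = pos
          · have hij : i = (pos-1)/2 := huniq i (hjpos ▸ hedge)
            subst hij
            rw [hjpos, hvP, hvpos]; exact le_of_lt hlt
          · by_cases hipos : i = pos
            · subst hipos
              rw [hvpos, hvo j hjP hjpos]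
              have := hb hsp j hedge hj
              rwa [hvsame _ (by omega), hvsame _ hjpos] at this
            · by_cases hiP : i = (pos-1)/2
              · subst hiP
                rw [hvP, hvo j hjP hjpos]
                have h2 := ha ((pos-1)/2) j hsP hedge hj hjpos
                rw [hvsame _ (by omega), hvsame _ hjpos] at h2
                exact le_trans (le_of_lt hlt) h2
              · rw [hvo i hiP hipos, hvo j hjP hjpos]
                have h2 := ha i j hi hedge hj hjpos
                rwa [hvsame _ hipos, hvsame _ hjpos] at h2
        · -- grandparent condition at the new position
          intro hsP' j hedge hj
          simp only [List.length_set] at hj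
          have hG : ((pos-1)/2-1)/2 < (pos-1)/2 := by omega
          have hsG : s ≤ ((pos-1)/2-1)/2 :=
            inSub_ge _ _ (inSub_parent hsP' (inSub_parent hsp hs))
          have hedgeGP : HeapEdge (((pos-1)/2-1)/2) ((pos-1)/2) := by
            unfold HeapEdge; omega
          have hvsame : ∀ k, k ≠ pos → hget (l.set pos newitem) k = hget l k := by
            intro k hk; rw [hget_set_ne hk]
          have hGP : hget l (((pos-1)/2-1)/2) ≤ hget l ((pos-1)/2) := by
            have h2 := ha _ _ hsG hedgeGP (by omega) (by omega)
            rwa [hvsame _ (by omega), hvsame _ (by omega)] at h2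
          have hvG : hget ((l.set pos (hget l ((pos-1)/2))).set ((pos-1)/2) newitem) (((pos-1)/2-1)/2)
              = hget l (((pos-1)/2-1)/2) := by
            rw [hget_set_ne (by omega), hget_set_ne (by omega)]
          rw [hvG]
          by_cases hjpos : j = pos
          · rw [hjpos, hget_set_ne (by omega), hget_set_self hp]
            exact hGP
          · have hjP : j ≠ (pos-1)/2 := by rcases hedge with h1 | h1 <;> omega
            rw [hget_set_ne hjP, hget_set_ne hjpos]
            have h3 := ha ((pos-1)/2) j hsP hedge hj hjpos
            rw [hvsame _ (by omega), hvsame _ hjpos] at h3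
            exact le_trans hGP h3
      · rename_i hge
        -- stop: parent ≤ newitem; writing newitem at pos gives a heap
        refine ⟨?_, List.Perm.refl _⟩
        intro i j hi hedge hj
        simp only [List.length_set] at hj
        by_cases hjpos : j = pos
        · have hij : i = (pos-1)/2 := huniq i (hjpos ▸ hedge)
          subst hij
          rw [hjpos, hget_set_ne (by omega), hget_set_self hp]
          omega
        · exact ha i j hi hedge hj hjpos
    · rename_i hsp
      -- pos ≤ startpos: write newitem and stop
      have hpos_s : pos = s := by have := inSub_ge pos s hs; omega
      refine ⟨?_, List.Perm.refl _⟩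
      intro i j hi hedge hj
      simp only [List.length_set] at hj
      by_cases hjpos : j = pos
      · exfalso; rcases hedge with h1 | h1 <;> omega
      · exact ha i j hi hedge hj hjpos

lemma siftupLoop_spec : ∀ (n : Nat) (l : List Int) (s pos : Nat) (newitem : Int),
    l.length - pos = n →
    pos < l.length → s ≤ pos → inSub s pos = true →
    (∀ i j, s ≤ i → HeapEdge i j → j < l.length → j ≠ pos → i ≠ pos →
      hget l i ≤ hget l j) →
    (s < pos → ∀ j, HeapEdge pos j → j < l.length → hget l ((pos-1)/2) ≤ hget l j) →
    HeapFrom (siftupLoop l s pos newitem) s ∧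
      (siftupLoop l s pos newitem).Perm (l.set pos newitem) := by
  intro n
  induction n using Nat.strong_induction_on with
  | _ n ihs =>
    intro l s pos newitem hn hp hsle hs ha hb
    rw [siftupLoop]
    split
    · rename_i hch
      have hcb := sChild_bounds l pos hch
      have hcedge : HeapEdge pos (sChild l pos) := sChild_edge l pos
      have hcmin : ∀ d, HeapEdge pos d → d < l.length → hget l (sChild l pos) ≤ hget l d :=
        sChild_min l pos hch
      have hcpar : (sChild l pos - 1) / 2 = pos := by
        rcases hcedge with h1 | h1 <;> omega
      have hkey : ∀ k, k ≠ pos → hget (l.set pos (hget l (sChild l pos))) k = hget l k := by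
        intro k hk; rw [hget_set_ne hk]
      have hkpos : hget (l.set pos (hget l (sChild l pos))) pos = hget l (sChild l pos) :=
        hget_set_self hp _
      have hrec := ihs (l.length - sChild l pos) (by omega)
        (l.set pos (hget l (sChild l pos))) s (sChild l pos) newitem
        (by simp) (by simp; omega) (by omega) (inSub_child hcedge hs) ?_ ?_
      · refine ⟨hrec.1, hrec.2.trans ?_⟩
        exact perm_set_up l pos (sChild l pos) newitem hcb.1 hcb.2
      · -- heap-except invariant after shifting the min child up
        intro i j hi hedge hj hjc hic
        simp only [List.length_set] at hj
        by_cases hjpos : j = pos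
        · have hij : i = (pos-1)/2 := by rcases (hjpos ▸ hedge) with h1 | h1 <;> omega
          have hsp : s < pos := by
            rcases (hjpos ▸ hedge) with h1 | h1 <;> omega
          subst hij
          rw [hjpos, hkpos, hkey _ (by omega)]
          exact hb hsp _ hcedge hcb.2
        · by_cases hipos : i = pos
          · subst hipos
            rw [hkpos, hkey _ hjpos]
            exact hcmin j hedge hj
          · rw [hkey _ hipos, hkey _ hjpos]
            exact ha i j hi hedge hj hjpos hipos
      · -- grandparent condition at the child position
        intro _ j hedge hj
        simp only [List.length_set] at hj
        rw [hcpar, hkpos]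
        have hjc : j ≠ sChild l pos := by rcases hedge with h1 | h1 <;> omega
        have hjpos : j ≠ pos := by
          rcases hedge with h1 | h1 <;> omega
        rw [hkey _ hjpos]
        exact ha (sChild l pos) j (by omega) hedge hj hjpos (by omega)
    · rename_i hch
      -- pos is a leaf: write newitem and sift it toward startpos
      have hsd := siftdownLoop_spec pos (l.set pos newitem) s newitem
        (by simp; omega) hs ?_ ?_
      · rw [List.set_set] at hsd
        exact hsd
      · intro i j hi hedge hj hjpos
        simp only [List.length_set] at hj
        by_cases hipos : i = pos
        · exfalso; rcases hedge with h1 | h1 <;> omega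
        · rw [List.set_set, hget_set_ne hjpos, hget_set_ne hipos]
          exact ha i j hi hedge hj hjpos hipos
      · intro hsp j hedge hj
        simp only [List.length_set] at hj
        exfalso; rcases hedge with h1 | h1 <;> omega

lemma pySiftup_spec {l : List Int} {pos : Nat} (h : pos < l.length)
    (hh : HeapFrom l (pos+1)) :
    HeapFrom (pySiftup l pos) pos ∧ (pySiftup l pos).Perm l := by
  have hspec := siftupLoop_spec (l.length - pos) l pos pos (hget l pos) rfl h
    (le_refl pos) (inSub_self pos) ?_ ?_
  · unfold pySiftup
    rw [set_hget_self h] at hspec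
    exact hspec
  · intro i j hi hedge hj _ hip
    exact hh i j (by omega) hedge hj
  · intro hc; omega

lemma pyHeapify_spec (l : List Int) :
    HeapFrom (pyHeapify l) 0 ∧ (pyHeapify l).Perm l := by
  have haux : ∀ (i : Nat) (h : List Int), i ≤ h.length → HeapFrom h i →
      HeapFrom (heapifyAux h i) 0 ∧ (heapifyAux h i).Perm h := by
    intro i
    induction i with
    | zero => intro h _ hh; exact ⟨hh, List.Perm.refl _⟩
    | succ i ih =>
      intro h hle hh
      rw [heapifyAux]
      have hi : i < h.length := by omega
      obtain ⟨hh2, hp2⟩ := pySiftup_spec hi hh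
      have hlen : (pySiftup h i).length = h.length := length_pySiftup h i
      obtain ⟨hh3, hp3⟩ := ih (pySiftup h i) (by omega) hh2
      exact ⟨hh3, hp3.trans hp2⟩
  apply haux
  · omega
  · intro i j hi hedge hj
    exfalso; rcases hedge with h1 | h1 <;> omega

lemma pyHeappop_spec {h : List Int} (hne : 1 ≤ h.length) (hh : HeapFrom h 0) :
    (pyHeappop h).1 = hget h 0 ∧ HeapFrom (pyHeappop h).2 0 ∧
      h.Perm ((pyHeappop h).1 :: (pyHeappop h).2) := by
  have hdl : h.dropLast.length = h.length - 1 := by simp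
  unfold pyHeappop
  split
  · rename_i hemp
    -- singleton heap: pop returns its only element
    have hlen1 : h.length = 1 := by
      rw [List.isEmpty_iff] at hemp
      have := congrArg List.length hemp
      simp at this
      omega
    obtain ⟨x, rfl⟩ := List.length_eq_one_iff.mp hlen1
    refine ⟨rfl, ?_, ?_⟩
    · intro i j hi hedge hj
      exfalso
      rw [List.isEmpty_iff] at hemp
      rw [hemp] at hj
      simp at hj
    · rw [List.isEmpty_iff] at hemp
      rw [hemp]
      exact List.Perm.refl _
  · rename_i hemp
    rw [List.isEmpty_iff] at hemp
    have hlen2 : 2 ≤ h.length := by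
      have : h.dropLast.length ≠ 0 := by
        intro h0; exact hemp (List.length_eq_zero_iff.mp h0)
      omega
    have hdl0 : 0 < h.dropLast.length := by omega
    have hgd : ∀ i, i < h.length - 1 → hget h.dropLast i = hget h i := by
      intro i hi
      rw [hget, hget, List.getD_eq_getElem _ _ (by omega),
        List.getD_eq_getElem _ _ (by omega), List.getElem_dropLast]
    -- the shortened array with the last element at the root is a heap from index 1
    have hh1 : HeapFrom (h.dropLast.set 0 (hget h (h.length - 1))) 1 := by
      intro i j hi hedge hj
      simp only [List.length_set] at hj
      have hij : i < j := by rcases hedge with h1 | h1 <;> omega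
      rw [hget_set_ne (by omega), hget_set_ne (by omega),
        hgd i (by omega), hgd j (by omega)]
      exact hh i j (by omega) hedge (by omega)
    obtain ⟨hh2, hp2⟩ := pySiftup_spec (l := h.dropLast.set 0 (hget h (h.length - 1)))
      (pos := 0) (by simp; omega) hh1
    refine ⟨by rw [hgd 0 (by omega)], hh2, ?_⟩
    -- permutation bookkeeping: h ~ h[0] :: (popped heap)
    obtain ⟨r0, rt, hrest⟩ := List.exists_cons_of_ne_nil hemp
    have hlast : h.dropLast ++ [h.getLast (by intro h0; subst h0; simp at hlen2)] = h :=
      List.dropLast_append_getLast _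
    have hgl : h.getLast (by intro h0; subst h0; simp at hlen2) = hget h (h.length - 1) := by
      simp only [hget]
      rw [List.getLast_eq_getElem, List.getD_eq_getElem _ _ (by omega)]
    have hr0 : hget h.dropLast 0 = r0 := by rw [hrest]; rfl
    have hset : h.dropLast.set 0 (hget h (h.length - 1)) = hget h (h.length - 1) :: rt := by
      rw [hrest]; rfl
    have heq : h.dropLast ++ [hget h (h.length - 1)] = h := by rw [← hgl]; exact hlast
    have p0 : h.Perm (hget h (h.length - 1) :: h.dropLast) := by
      nth_rewrite 1 [← heq]
      exact List.perm_append_singleton _ _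
    show h.Perm (hget h.dropLast 0 :: pySiftup (h.dropLast.set 0 (hget h (h.length - 1))) 0)
    refine p0.trans ?_
    rw [hr0, hrest]
    have : (hget h (h.length - 1) :: r0 :: rt).Perm (r0 :: hget h (h.length - 1) :: rt) :=
      List.Perm.swap r0 (hget h (h.length - 1)) rt
    refine this.trans (List.Perm.cons r0 ?_)
    rw [← hrest, ← hset]
    exact hp2.symm

lemma pyHeappush_spec {h : List Int} (hh : HeapFrom h 0) (x : Int) :
    HeapFrom (pyHeappush h x) 0 ∧ (pyHeappush h x).Perm (x :: h) := by
  have hlen : (h ++ [x]).length = h.length + 1 := by simp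
  have hpos : (h ++ [x]).length - 1 = h.length := by omega
  have hgx : hget (h ++ [x]) h.length = x := by
    simp [hget]
  have hga : ∀ i, i < h.length → hget (h ++ [x]) i = hget h i := by
    intro i hi
    simp [hget, List.getD, List.getElem?_append_left hi]
  have hspec := siftdownLoop_spec h.length (h ++ [x]) 0 (hget (h ++ [x]) h.length)
    (by rw [hlen]; omega) (inSub_zero _) ?_ ?_
  · unfold pyHeappush
    rw [hpos]
    rw [set_hget_self (by rw [hlen]; omega)] at hspec
    refine ⟨hspec.1, hspec.2.trans ?_⟩
    exact List.perm_append_singleton _ _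
  · intro i j hi hedge hj hjp
    rw [set_hget_self (by rw [hlen]; omega)]
    have hjl : j < h.length := by
      simp only [List.length_append, List.length_cons, List.length_nil] at hj
      omega
    have hil : i < h.length := by rcases hedge with h1 | h1 <;> omega
    rw [hga i hil, hga j hjl]
    exact hh i j (by omega) hedge hjl
  · intro h0 j hedge hj
    exfalso
    simp only [List.length_append, List.length_cons, List.length_nil] at hj
    rcases hedge with h1 | h1 <;> omega

-- ===== the two loops agree =====

-- the heap root is the value min() finds on any permutation of the heap
lemma root_eq_min {h s : List Int} (hh : HeapFrom h 0) (hp : h.Perm s)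
    (hne : 0 < h.length) {a : Int}
    (hmin : PySem.List.min? s (fun x => x) = some a) : hget h 0 = a := by
  have ha_mem : a ∈ s := PySem.List.min?_mem hmin
  have ha_min := PySem.List.min?_isMin hmin
  have h1 : hget h 0 ≤ a := heapFrom_root_min_mem hh a (hp.mem_iff.mpr ha_mem)
  have h2 : a ≤ hget h 0 := ha_min _ (hp.subset (hget_mem hne))
  omega

lemma loop_eq : ∀ (n : Nat) (h s : List Int) (K ans : Int), h.length = n →
    HeapFrom h 0 → h.Perm s → h ≠ [] → loopA h K ans = loopB s K ans := by
  intro n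
  induction n using Nat.strong_induction_on with
  | _ n ih =>
    intro h s K ans hn hh hperm hne
    have hlen0 : 0 < h.length := List.length_pos_iff.mpr hne
    have hslen : s.length = h.length := hperm.length_eq.symm
    have hsne : s ≠ [] := by
      intro h0
      rw [h0] at hslen
      simp at hslen
      omega
    obtain ⟨a, hmin⟩ : ∃ a, PySem.List.min? s (fun x => x) = some a := by
      cases hm : PySem.List.min? s (fun x => x) with
      | none => exact absurd ((PySem.List.min?_eq_none_iff s _).mp hm) hsne
      | some a => exact ⟨a, rfl⟩
    have ha_mem : a ∈ s := PySem.List.min?_mem hmin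
    have hroot : hget h 0 = a := root_eq_min hh hperm hlen0 hmin
    rw [loopA, loopB, hroot]
    by_cases hK : a < K
    · rw [if_pos hK]
      by_cases hl2 : h.length < 2
      · rw [if_pos hl2]
        split
        · rename_i heq
          rw [hmin] at heq
          simp at heq
        · rename_i a' heq
          rw [hmin] at heq
          injection heq with heq'
          subst heq'
          rw [if_neg (not_le.mpr hK), if_pos (by omega)]
      · rw [if_neg hl2]
        have hrs : PySem.List.remove? s a = some (s.erase a) :=
          PySem.List.remove?_eq_some_erase s a ha_mem
        have herase_len : (s.erase a).length = s.length - 1 := List.length_erase_of_mem ha_mem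
        split
        · rename_i heq
          rw [hmin] at heq
          simp at heq
        · rename_i a' heq
          rw [hmin] at heq
          injection heq with heq'
          subst heq'
          rw [if_neg (not_le.mpr hK), if_neg (by omega)]
          split
          · rename_i heq2
            rw [hrs] at heq2
            simp only [Option.getD_some] at heq2
            rw [PySem.List.min?_eq_none_iff] at heq2
            rw [heq2] at herase_len
            simp at herase_len
            omega
          · rename_i b heq2
            rw [hrs] at heq2
            simp only [Option.getD_some] at heq2
            have hb_mem : b ∈ s.erase a := PySem.List.min?_mem heq2
            have hrs2 : PySem.List.remove? (s.erase a) b = some ((s.erase a).erase b) :=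
              PySem.List.remove?_eq_some_erase _ b hb_mem
            rw [hrs]
            simp only [Option.getD_some]
            rw [hrs2]
            simp only [Option.getD_some]
            -- first pop
            obtain ⟨hp1a, hp1h, hp1p⟩ := pyHeappop_spec (show 1 ≤ h.length by omega) hh
            have hlen1 : (pyHeappop h).2.length = h.length - 1 := length_pyHeappop h
            have hperm1 : (pyHeappop h).2.Perm (s.erase a) := by
              have hstep : (a :: (pyHeappop h).2).Perm (a :: s.erase a) := by
                rw [hp1a, hroot] at hp1p
                exact (hp1p.symm.trans hperm).trans (List.perm_cons_erase ha_mem)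
              exact hstep.cons_inv
            have hlen1pos : 0 < (pyHeappop h).2.length := by omega
            have hroot1 : hget (pyHeappop h).2 0 = b := root_eq_min hp1h hperm1 hlen1pos heq2
            -- second pop
            obtain ⟨hp2a, hp2h, hp2p⟩ := pyHeappop_spec (show 1 ≤ (pyHeappop h).2.length by omega) hp1h
            have hlen2 : (pyHeappop (pyHeappop h).2).2.length = h.length - 2 := by
              rw [length_pyHeappop]; omega
            have hperm2 : (pyHeappop (pyHeappop h).2).2.Perm ((s.erase a).erase b) := by
              have hstep : (b :: (pyHeappop (pyHeappop h).2).2).Perm (b :: (s.erase a).erase b) := by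
                rw [hp2a, hroot1] at hp2p
                exact (hp2p.symm.trans hperm1).trans (List.perm_cons_erase hb_mem)
              exact hstep.cons_inv
            -- push the combined value
            have hval : (pyHeappop h).1 + (pyHeappop (pyHeappop h).2).1 * 2 = a + 2*b := by
              rw [hp1a, hroot, hp2a, hroot1]; ring
            obtain ⟨hph, hpp⟩ := pyHeappush_spec hp2h
              ((pyHeappop h).1 + (pyHeappop (pyHeappop h).2).1 * 2)
            have hpermN : (pyHeappush (pyHeappop (pyHeappop h).2).2
                ((pyHeappop h).1 + (pyHeappop (pyHeappop h).2).1 * 2)).Perm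
                ((s.erase a).erase b ++ [a + 2*b]) := by
              refine hpp.trans ?_
              rw [hval]
              exact (List.Perm.cons _ hperm2).trans (List.perm_append_singleton _ _).symm
            have hlenN : (pyHeappush (pyHeappop (pyHeappop h).2).2
                ((pyHeappop h).1 + (pyHeappop (pyHeappop h).2).1 * 2)).length = h.length - 1 := by
              rw [length_pyHeappush]; omega
            have hneN : pyHeappush (pyHeappop (pyHeappop h).2).2
                ((pyHeappop h).1 + (pyHeappop (pyHeappop h).2).1 * 2) ≠ [] := by
              intro h0
              have := congrArg List.length h0
              rw [hlenN] at this
              simp at this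
              omega
            exact ih (h.length - 1) (by omega) _ _ K (ans + 1) hlenN hph hpermN hneN
    · rw [if_neg hK]
      split
      · rename_i heq
        rw [hmin] at heq
      · rename_i a' heq
        rw [hmin] at heq
        injection heq with heq'
        subst heq'
        rw [if_pos (not_lt.mp hK)]

-- ===== VERDICT (by name: the statement is the Claim_ definition above) =====
theorem solution_spec : Claim_equal_solution := by
  intro scoville K _hdom hpre
  unfold Spec_solution solution solution_alt
  obtain ⟨hh, hperm⟩ := pyHeapify_spec scoville
  have hne : pyHeapify scoville ≠ [] := by
    intro h0
    rw [h0] at hperm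
    exact hpre hperm.symm.eq_nil
  exact loop_eq (pyHeapify scoville).length _ _ K 0 rfl hh hperm hne
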